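-- pv_equiv track=rewrite | github.com/posl/comment_recommendation | script/split_gen/1_time/en/152_C/7.py | solve
-- ===== SOURCE A (Python) =====
-- def solve(n, p):
--     ans = 0
--     m = p[0]
--     for i in range(n):
--         if m >= p[i]:
--             ans += 1
--             m = p[i]
--     return ans
-- ===== SOURCE B (Python) =====
-- def solve(n, p):
--     # two-pass: build prefix-minima table, then count matches
--     mins = []
--     m = p[0]
--     for x in p[:n]:
--         m = min(m, x)
--         mins.append(m)
--     return sum(1 for i in range(n) if p[i] == mins[i])
-- ===== Notes on version B (the rewrite author's own statement) =====
-- stated objective: alternative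
-- what changed: B builds the prefix-minima table in one pass and then counts indices where p[i] equals its prefix minimum in a second pass, instead of A's fused scan with a conditional running-min update.
import Mathlib
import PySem

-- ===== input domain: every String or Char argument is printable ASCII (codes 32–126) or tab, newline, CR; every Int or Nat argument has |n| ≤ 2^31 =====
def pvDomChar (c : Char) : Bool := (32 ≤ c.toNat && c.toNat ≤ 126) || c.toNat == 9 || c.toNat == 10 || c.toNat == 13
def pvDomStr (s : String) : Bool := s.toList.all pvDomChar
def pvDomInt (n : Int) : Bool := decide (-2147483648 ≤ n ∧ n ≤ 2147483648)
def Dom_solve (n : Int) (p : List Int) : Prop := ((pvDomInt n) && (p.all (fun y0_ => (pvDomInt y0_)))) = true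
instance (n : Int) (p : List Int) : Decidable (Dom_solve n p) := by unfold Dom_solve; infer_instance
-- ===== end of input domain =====

-- B separates A's fused scan into two passes: build the prefix-minima table, then count matches (alternative decomposition, same cost).


-- ===== PORT A =====
def solve (n : Int) (p : List Int) : Int :=
  let st := (PySem.List.pyRange 0 n 1).foldl
    (fun (st : Int × Int) i =>
      let pi := PySem.List.pyGetD p i 0
      if st.2 ≥ pi then (st.1 + 1, pi) else st)
    (0, PySem.List.pyGetD p 0 0)
  st.1

-- ===== PORT B =====
def solve_alt (n : Int) (p : List Int) : Int :=
  let mins := ((PySem.List.slice p none (some n)).foldl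
    (fun (st : List Int × Int) x =>
      let m := min st.2 x
      (st.1 ++ [m], m))
    ([], PySem.List.pyGetD p 0 0)).1
  (PySem.List.pyRange 0 n 1).foldl
    (fun acc i =>
      if PySem.List.pyGetD p i 0 = PySem.List.pyGetD mins i 0 then acc + 1 else acc)
    0

-- ===== PRECONDITION & SPEC =====
-- A raises IndexError on p = [] (p[0]) and when n > len(p) (p[i] inside the loop); B raises there too.
def Pre_solve (n : Int) (p : List Int) : Prop := p ≠ [] ∧ n ≤ (p.length : Int)
instance (n : Int) (p : List Int) : Decidable (Pre_solve n p) := by unfold Pre_solve; infer_instance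
def pvWitness_solve : Int × List Int := (3, [2, 3, 1])
def Spec_solve (n : Int) (p : List Int) (out : Int) : Prop := out = solve_alt n p
instance (n : Int) (p : List Int) (out : Int) : Decidable (Spec_solve n p out) := by unfold Spec_solve; infer_instance

-- ===== CLAIM (what is proved, stated in full; the proofs are below) =====
def Claim_equal_solve : Prop := ∀ (n : Int) (p : List Int), Dom_solve n p → Pre_solve n p → Spec_solve n p (solve n p)

-- ===== LEMMAS AND PROOFS =====

/-- The count both programs compute, as a structural recursion: a position counts iff
    its value is ≤ the running minimum so far. -/
def countSpec (m : Int) : List Int → Int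
  | [] => 0
  | x :: t => (if m ≥ x then 1 else 0) + countSpec (min m x) t

/-- B's prefix-minima table, structurally. -/
def minsFrom (m : Int) : List Int → List Int
  | [] => []
  | x :: t => min m x :: minsFrom (min m x) t

theorem length_minsFrom (m : Int) (q : List Int) : (minsFrom m q).length = q.length := by
  induction q generalizing m with
  | nil => rfl
  | cons x t ih => simp [minsFrom, ih]

theorem foldlA_eq_countSpec (q : List Int) (acc m : Int) :
    (q.foldl (fun (st : Int × Int) x => if st.2 ≥ x then (st.1 + 1, x) else st) (acc, m)).1
      = acc + countSpec m q := by
  induction q generalizing acc m with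
  | nil => simp [countSpec]
  | cons x t ih =>
    by_cases h : m ≥ x
    · simp [List.foldl_cons, h, ih, countSpec]
      ring
    · simp [List.foldl_cons, h, ih, countSpec, min_eq_left (le_of_not_ge h)]

theorem foldlB_eq_minsFrom (q : List Int) (acc : List Int) (m : Int) :
    (q.foldl (fun (st : List Int × Int) x => (st.1 ++ [min st.2 x], min st.2 x)) (acc, m)).1
      = acc ++ minsFrom m q := by
  induction q generalizing acc m with
  | nil => simp [minsFrom]
  | cons x t ih => simp [List.foldl_cons, ih, minsFrom]

theorem zip_count_eq_countSpec (q : List Int) (m acc : Int) :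
    ((q.zip (minsFrom m q)).foldl
        (fun acc (x : Int × Int) => if x.1 = x.2 then acc + 1 else acc) acc)
      = acc + countSpec m q := by
  induction q generalizing m acc with
  | nil => simp [countSpec]
  | cons x t ih =>
    by_cases h : m ≥ x
    · have hx : min m x = x := min_eq_right h
      simp [minsFrom, List.zip_cons_cons, ih, countSpec, h]
      ring
    · have hx : min m x = m := min_eq_left (le_of_not_ge h)
      have hne : x ≠ min m x := fun he => h (by rw [hx] at he; exact le_of_eq he)
      simp [minsFrom, List.zip_cons_cons, hne, ih, countSpec, h]

theorem solve_eq (n : Int) (p : List Int) (hn : n ≤ (p.length : Int)) :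
    solve n p = solve_alt n p := by
  by_cases hn0 : n ≤ 0
  · simp [solve, solve_alt, PySem.List.pyRange_one_eq_nil hn0]
  · rw [not_le] at hn0
    have hkn : ((n.toNat : Int)) = n := Int.toNat_of_nonneg hn0.le
    have hkl : n.toNat ≤ p.length := by omega
    set m0 : Int := PySem.List.pyGetD p 0 0 with hm0
    set q : List Int := p.take n.toNat with hq
    have hql : q.length = n.toNat := by simp [hq]; omega
    have hqn : ((q.length : Int)) = n := by rw [hql, hkn]
    -- indexing p and its prefix q agree on the loop's index range
    have hget : ∀ (i : Int), 0 ≤ i → i < n → ∀ d : Int,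
        PySem.List.pyGetD p i d = PySem.List.pyGetD q i d := by
      intro i h0 h1 d
      have hiq : i < (q.length : Int) := by rw [hqn]; exact h1
      have hip : i < (p.length : Int) := by omega
      rw [PySem.List.pyGetD_eq_getElem p d h0 hip,
          PySem.List.pyGetD_eq_getElem q d h0 hiq]
      simp [hq, List.getElem_take]
    -- the A side
    have hA : solve n p
        = (q.foldl (fun (st : Int × Int) x => if st.2 ≥ x then (st.1 + 1, x) else st) (0, m0)).1 := by
      show ((PySem.List.pyRange 0 n 1).foldl
        (fun (st : Int × Int) i =>
          let pi := PySem.List.pyGetD p i 0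
          if st.2 ≥ pi then (st.1 + 1, pi) else st) (0, m0)).1 = _
      rw [PySem.List.foldl_congr_mem _ _
            (fun (st : Int × Int) i =>
              let pi := PySem.List.pyGetD q i 0
              if st.2 ≥ pi then (st.1 + 1, pi) else st) _
            (by
              intro acc x hx
              rcases PySem.List.mem_pyRange_one.mp hx with ⟨hx0, hx1⟩
              simp only [hget x hx0 hx1 0])]
      rw [← hqn]
      rw [PySem.List.foldl_pyRange_zero_pyGetD' q 0
            (fun (st : Int × Int) x => if st.2 ≥ x then (st.1 + 1, x) else st) (0, m0)]
    -- the B side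
    have hmins : ((PySem.List.slice p none (some n)).foldl
        (fun (st : List Int × Int) x => (st.1 ++ [min st.2 x], min st.2 x)) ([], m0)).1
          = minsFrom m0 q := by
      rw [PySem.List.slice_to p hn0.le, ← hq, foldlB_eq_minsFrom, List.nil_append]
    set z : List (Int × Int) := q.zip (minsFrom m0 q) with hz
    have hzl : (z.length : Int) = n := by
      simp [hz, length_minsFrom, hql, hkn]
    have hB : solve_alt n p
        = z.foldl (fun acc (x : Int × Int) => if x.1 = x.2 then acc + 1 else acc) 0 := by
      show ((PySem.List.pyRange 0 n 1).foldl
        (fun acc i =>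
          if PySem.List.pyGetD p i 0
            = PySem.List.pyGetD (((PySem.List.slice p none (some n)).foldl
                (fun (st : List Int × Int) x => (st.1 ++ [min st.2 x], min st.2 x)) ([], m0)).1) i 0
          then acc + 1 else acc) 0) = _
      rw [PySem.List.foldl_congr_mem _ _
            (fun acc i =>
              if (PySem.List.pyGetD z i (0, 0)).1 = (PySem.List.pyGetD z i (0, 0)).2
              then acc + 1 else acc) _
            (by
              intro acc x hx
              rcases PySem.List.mem_pyRange_one.mp hx with ⟨hx0, hx1⟩
              have hxz : x < (z.length : Int) := by rw [hzl]; exact hx1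
              have hxq : x < (q.length : Int) := by rw [hqn]; exact hx1
              have hxm : x < ((minsFrom m0 q).length : Int) := by
                rw [length_minsFrom]; exact hxq
              rw [hmins, hget x hx0 hx1 0,
                  PySem.List.pyGetD_eq_getElem q 0 hx0 hxq,
                  PySem.List.pyGetD_eq_getElem (minsFrom m0 q) 0 hx0 hxm]
              show _ = (if (PySem.List.pyGetD z x (0, 0)).1 = (PySem.List.pyGetD z x (0, 0)).2
                then acc + 1 else acc)
              rw [PySem.List.pyGetD_eq_getElem z (0, 0) hx0 hxz]
              simp [hz, List.getElem_zip])]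
      rw [← hzl]
      rw [PySem.List.foldl_pyRange_zero_pyGetD' z (0, 0)
            (fun acc (x : Int × Int) => if x.1 = x.2 then acc + 1 else acc) 0]
    rw [hA, hB, foldlA_eq_countSpec, zip_count_eq_countSpec]

-- ===== VERDICT (by name: the statement is the Claim_ definition above) =====
theorem solve_spec : Claim_equal_solve := by
  intro n p _ hpre
  exact solve_eq n p hpre.2
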